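-- pv_equiv track=rewrite | github.com/itsgrimetime/matchcaller | matchcaller/utils/resolve.py | _normalize_short_url
-- ===== SOURCE A (Python) =====
-- def _normalize_short_url(short_url: str) -> str:
--     """Normalize a short URL by removing common prefixes."""
--     prefixes = [
--         "https://www.start.gg/",
--         "https://start.gg/",
--         "http://www.start.gg/",
--         "http://start.gg/",
--         "www.start.gg/",
--         "start.gg/",
--     ]
--     for prefix in prefixes:
--         if short_url.startswith(prefix):
--             return short_url[len(prefix):]
--     return short_url
-- ===== SOURCE B (Python) =====
-- def _normalize_short_url(short_url: str) -> str:
--     """Normalize a short URL by stripping the optional scheme, optional 'www.',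
--     and the required 'start.gg/' component by component."""
--     rest = short_url
--     if rest.startswith("https://"):
--         rest = rest[8:]
--     elif rest.startswith("http://"):
--         rest = rest[7:]
--     if rest.startswith("www."):
--         rest = rest[4:]
--     if rest.startswith("start.gg/"):
--         return rest[9:]
--     return short_url
-- ===== Notes on version B (the rewrite author's own statement) =====
-- stated objective: simpler
-- what changed: B strips the URL component by component (optional https:///http:// scheme, then optional 'www.', then the required 'start.gg/') instead of scanning a table of the six full literal prefixes.
import Mathlib
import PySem

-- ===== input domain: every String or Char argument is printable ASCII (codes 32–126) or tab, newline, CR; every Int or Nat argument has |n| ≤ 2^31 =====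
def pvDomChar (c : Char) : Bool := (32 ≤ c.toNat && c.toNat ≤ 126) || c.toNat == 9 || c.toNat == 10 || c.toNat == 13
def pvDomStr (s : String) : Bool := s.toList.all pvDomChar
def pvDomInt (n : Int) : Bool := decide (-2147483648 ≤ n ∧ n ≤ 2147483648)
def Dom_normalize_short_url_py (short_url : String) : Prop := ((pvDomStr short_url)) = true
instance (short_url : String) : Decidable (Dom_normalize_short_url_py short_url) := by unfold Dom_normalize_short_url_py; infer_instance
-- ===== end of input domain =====

-- B strips the URL component by component (optional scheme, optional "www.", then the
-- required "start.gg/") instead of scanning a table of the six full literal prefixes; simpler.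

-- ===== PORT A =====
def pvPrefixesA : List String :=
  ["https://www.start.gg/", "https://start.gg/", "http://www.start.gg/",
   "http://start.gg/", "www.start.gg/", "start.gg/"]

-- the 'for prefix in prefixes: if startswith: return short_url[len(prefix):]' loop
def pvStripFirstA : List String → String → String
  | [], s => s
  | p :: ps, s =>
    if PySem.Str.startswith s p then PySem.Str.slice s (some (PySem.Str.len p)) none
    else pvStripFirstA ps s

def normalize_short_url_py (short_url : String) : String :=
  pvStripFirstA pvPrefixesA short_url

-- ===== PORT B =====
def normalize_short_url_py_alt (short_url : String) : String :=
  let rest :=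
    if PySem.Str.startswith short_url "https://" then PySem.Str.slice short_url (some 8) none
    else if PySem.Str.startswith short_url "http://" then PySem.Str.slice short_url (some 7) none
    else short_url
  let rest2 :=
    if PySem.Str.startswith rest "www." then PySem.Str.slice rest (some 4) none else rest
  if PySem.Str.startswith rest2 "start.gg/" then PySem.Str.slice rest2 (some 9) none
  else short_url

-- ===== PRECONDITION & SPEC =====
def Spec_normalize_short_url_py (short_url : String) (out : String) : Prop := out = normalize_short_url_py_alt short_url
instance (short_url : String) (out : String) : Decidable (Spec_normalize_short_url_py short_url out) := by unfold Spec_normalize_short_url_py; infer_instance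

-- ===== CLAIM (what is proved, stated in full; the proofs are below) =====
def Claim_equal_normalize_short_url_py : Prop := ∀ (short_url : String), Dom_normalize_short_url_py short_url → Spec_normalize_short_url_py short_url (normalize_short_url_py short_url)

-- ===== LEMMAS AND PROOFS =====

lemma pvSWt {s p : String} (h : p.toList <+: s.toList) : PySem.Str.startswith s p = true := by
  rw [PySem.Str.startswith_eq, PySem.Chars.startswith_iff]; exact h

lemma pvSWf {s p : String} (h : ¬ p.toList <+: s.toList) : PySem.Str.startswith s p = false := by
  rw [PySem.Str.startswith_eq, ← Bool.not_eq_true, PySem.Chars.startswith_iff]; exact h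

lemma pvIncomp {p q l : List Char} (hp : p <+: l) (h1 : ¬ p <+: q) (h2 : ¬ q <+: p) :
    ¬ q <+: l :=
  fun hq => Or.elim (List.prefix_or_prefix_of_prefix hq hp) h2 h1

lemma pvPrefixAppend (p q l : List Char) :
    (p ++ q) <+: l ↔ p <+: l ∧ q <+: l.drop p.length := by
  constructor
  · rintro ⟨t, rfl⟩
    refine ⟨⟨q ++ t, by simp⟩, ?_⟩
    rw [List.append_assoc, List.drop_left]
    exact ⟨t, rfl⟩
  · rintro ⟨⟨t, rfl⟩, hq⟩
    rw [List.drop_left] at hq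
    obtain ⟨u, rfl⟩ := hq
    exact ⟨u, by simp⟩

lemma pvP1_iff (l : List Char) :
    ("https://www.start.gg/" : String).toList <+: l ↔
      ("https://" : String).toList <+: l ∧ ("www." : String).toList <+: l.drop 8 ∧
        ("start.gg/" : String).toList <+: l.drop 12 := by
  rw [show ("https://www.start.gg/" : String).toList
        = ("https://" : String).toList ++ (("www." : String).toList ++ ("start.gg/" : String).toList) from rfl,
      pvPrefixAppend, pvPrefixAppend,
      show ("https://" : String).toList.length = 8 from by decide,
      show ("www." : String).toList.length = 4 from by decide, List.drop_drop]

lemma pvP2_iff (l : List Char) :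
    ("https://start.gg/" : String).toList <+: l ↔
      ("https://" : String).toList <+: l ∧ ("start.gg/" : String).toList <+: l.drop 8 := by
  rw [show ("https://start.gg/" : String).toList
        = ("https://" : String).toList ++ ("start.gg/" : String).toList from rfl,
      pvPrefixAppend, show ("https://" : String).toList.length = 8 from by decide]

lemma pvP3_iff (l : List Char) :
    ("http://www.start.gg/" : String).toList <+: l ↔
      ("http://" : String).toList <+: l ∧ ("www." : String).toList <+: l.drop 7 ∧
        ("start.gg/" : String).toList <+: l.drop 11 := by
  rw [show ("http://www.start.gg/" : String).toList
        = ("http://" : String).toList ++ (("www." : String).toList ++ ("start.gg/" : String).toList) from rfl,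
      pvPrefixAppend, pvPrefixAppend,
      show ("http://" : String).toList.length = 7 from by decide,
      show ("www." : String).toList.length = 4 from by decide, List.drop_drop]

lemma pvP4_iff (l : List Char) :
    ("http://start.gg/" : String).toList <+: l ↔
      ("http://" : String).toList <+: l ∧ ("start.gg/" : String).toList <+: l.drop 7 := by
  rw [show ("http://start.gg/" : String).toList
        = ("http://" : String).toList ++ ("start.gg/" : String).toList from rfl,
      pvPrefixAppend, show ("http://" : String).toList.length = 7 from by decide]

lemma pvP5_iff (l : List Char) :
    ("www.start.gg/" : String).toList <+: l ↔
      ("www." : String).toList <+: l ∧ ("start.gg/" : String).toList <+: l.drop 4 := by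
  rw [show ("www.start.gg/" : String).toList
        = ("www." : String).toList ++ ("start.gg/" : String).toList from rfl,
      pvPrefixAppend, show ("www." : String).toList.length = 4 from by decide]

-- ===== VERDICT (by name: the statement is the Claim_ definition above) =====
theorem normalize_short_url_py_spec : Claim_equal_normalize_short_url_py := by
  intro s _
  show normalize_short_url_py s = normalize_short_url_py_alt s
  by_cases h1 : ("https://" : String).toList <+: s.toList
  · -- scheme https://
    have nT : ¬ ("http://" : String).toList <+: s.toList := pvIncomp h1 (by decide) (by decide)
    have nW : ¬ ("www." : String).toList <+: s.toList := pvIncomp h1 (by decide) (by decide)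
    have nG : ¬ ("start.gg/" : String).toList <+: s.toList := pvIncomp h1 (by decide) (by decide)
    have a3 : PySem.Str.startswith s "http://www.start.gg/" = false :=
      pvSWf (fun hc => nT ((pvP3_iff _).mp hc).1)
    have a4 : PySem.Str.startswith s "http://start.gg/" = false :=
      pvSWf (fun hc => nT ((pvP4_iff _).mp hc).1)
    have a5 : PySem.Str.startswith s "www.start.gg/" = false :=
      pvSWf (fun hc => nW ((pvP5_iff _).mp hc).1)
    have a6 : PySem.Str.startswith s "start.gg/" = false := pvSWf nG
    have b1 : PySem.Str.startswith s "https://" = true := pvSWt h1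
    have e8 : PySem.Str.slice s (some 8) none = String.ofList (s.toList.drop 8) := by
      simp [PySem.Str.slice, PySem.Chars.slice_eq_listSlice, PySem.List.slice_from]
    have e84 : PySem.Str.slice (PySem.Str.slice s (some 8) none) (some 4) none
        = String.ofList (s.toList.drop 12) := by
      simp [PySem.Str.slice, PySem.Chars.slice_eq_listSlice, PySem.List.slice_from, List.drop_drop]
    by_cases hw : ("www." : String).toList <+: s.toList.drop 8
    · have b2 : PySem.Str.startswith (PySem.Str.slice s (some 8) none) "www." = true := by
        rw [e8]; exact pvSWt (by simpa using hw)
      by_cases hg : ("start.gg/" : String).toList <+: s.toList.drop 12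
      · have a1 : PySem.Str.startswith s "https://www.start.gg/" = true :=
          pvSWt ((pvP1_iff _).mpr ⟨h1, hw, hg⟩)
        have b3 : PySem.Str.startswith (PySem.Str.slice (PySem.Str.slice s (some 8) none) (some 4) none)
            "start.gg/" = true := by
          rw [e84]; exact pvSWt (by simpa using hg)
        simp only [normalize_short_url_py, pvPrefixesA, pvStripFirstA, normalize_short_url_py_alt,
          a1, b1, b2, b3, if_true]
        rw [show PySem.Str.len "https://www.start.gg/" = 21 from by decide]
        simp [PySem.Str.slice, PySem.Chars.slice_eq_listSlice, PySem.List.slice_from, List.drop_drop]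
      · have nG8 : ¬ ("start.gg/" : String).toList <+: s.toList.drop 8 :=
          pvIncomp hw (by decide) (by decide)
        have a1 : PySem.Str.startswith s "https://www.start.gg/" = false :=
          pvSWf (fun hc => hg ((pvP1_iff _).mp hc).2.2)
        have a2 : PySem.Str.startswith s "https://start.gg/" = false :=
          pvSWf (fun hc => nG8 ((pvP2_iff _).mp hc).2)
        have b3 : PySem.Str.startswith (PySem.Str.slice (PySem.Str.slice s (some 8) none) (some 4) none)
            "start.gg/" = false := by
          rw [e84]; exact pvSWf (by simpa using hg)
        simp only [normalize_short_url_py, pvPrefixesA, pvStripFirstA, normalize_short_url_py_alt,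
          a1, a2, a3, a4, a5, a6, b1, b2, b3, Bool.false_eq_true, if_false, if_true]
    · have b2 : PySem.Str.startswith (PySem.Str.slice s (some 8) none) "www." = false := by
        rw [e8]; exact pvSWf (by simpa using hw)
      have a1 : PySem.Str.startswith s "https://www.start.gg/" = false :=
        pvSWf (fun hc => hw ((pvP1_iff _).mp hc).2.1)
      by_cases hg : ("start.gg/" : String).toList <+: s.toList.drop 8
      · have a2 : PySem.Str.startswith s "https://start.gg/" = true :=
          pvSWt ((pvP2_iff _).mpr ⟨h1, hg⟩)
        have b3 : PySem.Str.startswith (PySem.Str.slice s (some 8) none) "start.gg/" = true := by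
          rw [e8]; exact pvSWt (by simpa using hg)
        simp only [normalize_short_url_py, pvPrefixesA, pvStripFirstA, normalize_short_url_py_alt,
          a1, a2, b1, b2, b3, Bool.false_eq_true, if_false, if_true]
        rw [show PySem.Str.len "https://start.gg/" = 17 from by decide]
        simp [PySem.Str.slice, PySem.Chars.slice_eq_listSlice, PySem.List.slice_from, List.drop_drop]
      · have a2 : PySem.Str.startswith s "https://start.gg/" = false :=
          pvSWf (fun hc => hg ((pvP2_iff _).mp hc).2)
        have b3 : PySem.Str.startswith (PySem.Str.slice s (some 8) none) "start.gg/" = false := by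
          rw [e8]; exact pvSWf (by simpa using hg)
        simp only [normalize_short_url_py, pvPrefixesA, pvStripFirstA, normalize_short_url_py_alt,
          a1, a2, a3, a4, a5, a6, b1, b2, b3, Bool.false_eq_true, if_false, if_true]
  · by_cases h2 : ("http://" : String).toList <+: s.toList
    · -- scheme http://
      have nW : ¬ ("www." : String).toList <+: s.toList := pvIncomp h2 (by decide) (by decide)
      have nG : ¬ ("start.gg/" : String).toList <+: s.toList := pvIncomp h2 (by decide) (by decide)
      have a1 : PySem.Str.startswith s "https://www.start.gg/" = false :=
        pvSWf (fun hc => h1 ((pvP1_iff _).mp hc).1)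
      have a2 : PySem.Str.startswith s "https://start.gg/" = false :=
        pvSWf (fun hc => h1 ((pvP2_iff _).mp hc).1)
      have a5 : PySem.Str.startswith s "www.start.gg/" = false :=
        pvSWf (fun hc => nW ((pvP5_iff _).mp hc).1)
      have a6 : PySem.Str.startswith s "start.gg/" = false := pvSWf nG
      have b0 : PySem.Str.startswith s "https://" = false := pvSWf h1
      have b1 : PySem.Str.startswith s "http://" = true := pvSWt h2
      have e7 : PySem.Str.slice s (some 7) none = String.ofList (s.toList.drop 7) := by
        simp [PySem.Str.slice, PySem.Chars.slice_eq_listSlice, PySem.List.slice_from]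
      have e74 : PySem.Str.slice (PySem.Str.slice s (some 7) none) (some 4) none
          = String.ofList (s.toList.drop 11) := by
        simp [PySem.Str.slice, PySem.Chars.slice_eq_listSlice, PySem.List.slice_from, List.drop_drop]
      by_cases hw : ("www." : String).toList <+: s.toList.drop 7
      · have b2 : PySem.Str.startswith (PySem.Str.slice s (some 7) none) "www." = true := by
          rw [e7]; exact pvSWt (by simpa using hw)
        by_cases hg : ("start.gg/" : String).toList <+: s.toList.drop 11
        · have a3 : PySem.Str.startswith s "http://www.start.gg/" = true :=
            pvSWt ((pvP3_iff _).mpr ⟨h2, hw, hg⟩)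
          have b3 : PySem.Str.startswith (PySem.Str.slice (PySem.Str.slice s (some 7) none) (some 4) none)
              "start.gg/" = true := by
            rw [e74]; exact pvSWt (by simpa using hg)
          simp only [normalize_short_url_py, pvPrefixesA, pvStripFirstA, normalize_short_url_py_alt,
            a1, a2, a3, b0, b1, b2, b3, Bool.false_eq_true, if_false, if_true]
          rw [show PySem.Str.len "http://www.start.gg/" = 20 from by decide]
          simp [PySem.Str.slice, PySem.Chars.slice_eq_listSlice, PySem.List.slice_from, List.drop_drop]
        · have nG7 : ¬ ("start.gg/" : String).toList <+: s.toList.drop 7 :=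
            pvIncomp hw (by decide) (by decide)
          have a3 : PySem.Str.startswith s "http://www.start.gg/" = false :=
            pvSWf (fun hc => hg ((pvP3_iff _).mp hc).2.2)
          have a4 : PySem.Str.startswith s "http://start.gg/" = false :=
            pvSWf (fun hc => nG7 ((pvP4_iff _).mp hc).2)
          have b3 : PySem.Str.startswith (PySem.Str.slice (PySem.Str.slice s (some 7) none) (some 4) none)
              "start.gg/" = false := by
            rw [e74]; exact pvSWf (by simpa using hg)
          simp only [normalize_short_url_py, pvPrefixesA, pvStripFirstA, normalize_short_url_py_alt,
            a1, a2, a3, a4, a5, a6, b0, b1, b2, b3, Bool.false_eq_true, if_false, if_true]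
      · have b2 : PySem.Str.startswith (PySem.Str.slice s (some 7) none) "www." = false := by
          rw [e7]; exact pvSWf (by simpa using hw)
        have a3 : PySem.Str.startswith s "http://www.start.gg/" = false :=
          pvSWf (fun hc => hw ((pvP3_iff _).mp hc).2.1)
        by_cases hg : ("start.gg/" : String).toList <+: s.toList.drop 7
        · have a4 : PySem.Str.startswith s "http://start.gg/" = true :=
            pvSWt ((pvP4_iff _).mpr ⟨h2, hg⟩)
          have b3 : PySem.Str.startswith (PySem.Str.slice s (some 7) none) "start.gg/" = true := by
            rw [e7]; exact pvSWt (by simpa using hg)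
          simp only [normalize_short_url_py, pvPrefixesA, pvStripFirstA, normalize_short_url_py_alt,
            a1, a2, a3, a4, b0, b1, b2, b3, Bool.false_eq_true, if_false, if_true]
          rw [show PySem.Str.len "http://start.gg/" = 16 from by decide]
          simp [PySem.Str.slice, PySem.Chars.slice_eq_listSlice, PySem.List.slice_from, List.drop_drop]
        · have a4 : PySem.Str.startswith s "http://start.gg/" = false :=
            pvSWf (fun hc => hg ((pvP4_iff _).mp hc).2)
          have b3 : PySem.Str.startswith (PySem.Str.slice s (some 7) none) "start.gg/" = false := by
            rw [e7]; exact pvSWf (by simpa using hg)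
          simp only [normalize_short_url_py, pvPrefixesA, pvStripFirstA, normalize_short_url_py_alt,
            a1, a2, a3, a4, a5, a6, b0, b1, b2, b3, Bool.false_eq_true, if_false, if_true]
    · -- no scheme
      have a1 : PySem.Str.startswith s "https://www.start.gg/" = false :=
        pvSWf (fun hc => h1 ((pvP1_iff _).mp hc).1)
      have a2 : PySem.Str.startswith s "https://start.gg/" = false :=
        pvSWf (fun hc => h1 ((pvP2_iff _).mp hc).1)
      have a3 : PySem.Str.startswith s "http://www.start.gg/" = false :=
        pvSWf (fun hc => h2 ((pvP3_iff _).mp hc).1)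
      have a4 : PySem.Str.startswith s "http://start.gg/" = false :=
        pvSWf (fun hc => h2 ((pvP4_iff _).mp hc).1)
      have b0 : PySem.Str.startswith s "https://" = false := pvSWf h1
      have b1 : PySem.Str.startswith s "http://" = false := pvSWf h2
      have e4 : PySem.Str.slice s (some 4) none = String.ofList (s.toList.drop 4) := by
        simp [PySem.Str.slice, PySem.Chars.slice_eq_listSlice, PySem.List.slice_from]
      by_cases hw : ("www." : String).toList <+: s.toList
      · have b2 : PySem.Str.startswith s "www." = true := pvSWt hw
        have nG0 : ¬ ("start.gg/" : String).toList <+: s.toList :=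
          pvIncomp hw (by decide) (by decide)
        have a6 : PySem.Str.startswith s "start.gg/" = false := pvSWf nG0
        by_cases hg : ("start.gg/" : String).toList <+: s.toList.drop 4
        · have a5 : PySem.Str.startswith s "www.start.gg/" = true :=
            pvSWt ((pvP5_iff _).mpr ⟨hw, hg⟩)
          have b3 : PySem.Str.startswith (PySem.Str.slice s (some 4) none) "start.gg/" = true := by
            rw [e4]; exact pvSWt (by simpa using hg)
          simp only [normalize_short_url_py, pvPrefixesA, pvStripFirstA, normalize_short_url_py_alt,
            a1, a2, a3, a4, a5, b0, b1, b2, b3, Bool.false_eq_true, if_false, if_true]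
          rw [show PySem.Str.len "www.start.gg/" = 13 from by decide]
          simp [PySem.Str.slice, PySem.Chars.slice_eq_listSlice, PySem.List.slice_from, List.drop_drop]
        · have a5 : PySem.Str.startswith s "www.start.gg/" = false :=
            pvSWf (fun hc => hg ((pvP5_iff _).mp hc).2)
          have b3 : PySem.Str.startswith (PySem.Str.slice s (some 4) none) "start.gg/" = false := by
            rw [e4]; exact pvSWf (by simpa using hg)
          simp only [normalize_short_url_py, pvPrefixesA, pvStripFirstA, normalize_short_url_py_alt,
            a1, a2, a3, a4, a5, a6, b0, b1, b2, b3, Bool.false_eq_true, if_false, if_true]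
      · have b2 : PySem.Str.startswith s "www." = false := pvSWf hw
        have a5 : PySem.Str.startswith s "www.start.gg/" = false :=
          pvSWf (fun hc => hw ((pvP5_iff _).mp hc).1)
        by_cases hg : ("start.gg/" : String).toList <+: s.toList
        · have a6 : PySem.Str.startswith s "start.gg/" = true := pvSWt hg
          simp only [normalize_short_url_py, pvPrefixesA, pvStripFirstA, normalize_short_url_py_alt,
            a1, a2, a3, a4, a5, a6, b0, b1, b2, Bool.false_eq_true, if_false, if_true]
          rw [show PySem.Str.len "start.gg/" = 9 from by decide]
        · have a6 : PySem.Str.startswith s "start.gg/" = false := pvSWf hg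
          simp only [normalize_short_url_py, pvPrefixesA, pvStripFirstA, normalize_short_url_py_alt,
            a1, a2, a3, a4, a5, a6, b0, b1, b2, Bool.false_eq_true, if_false, if_true]
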